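-- pv_equiv track=rewrite | github.com/WDongYuan/cantonese_f0_generation | DCT/run.py | SplitSyllable
-- ===== SOURCE A (Python) =====
-- def SplitSyllable(s):
-- 	l = []
-- 	begin = 0
-- 	for i in range(len(s)):
-- 		if s[i].isdigit():
-- 			l.append(s[begin:i+1])
-- 			begin = i+1
-- 	return l
-- ===== SOURCE B (Python) =====
-- def SplitSyllable(s):
--     # Scan backwards: start at the last digit (dropping the digit-free tail),
--     # then repeatedly find the previous digit and cut the chunk between them;
--     # chunks are collected back-to-front and reversed at the end.
--     out = []
--     j = len(s) - 1
--     while j >= 0 and not s[j].isdigit():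
--         j -= 1
--     while j >= 0:
--         i = j - 1
--         while i >= 0 and not s[i].isdigit():
--             i -= 1
--         out.append(s[i + 1:j + 1])
--         j = i
--     out.reverse()
--     return out
-- ===== Notes on version B (the rewrite author's own statement) =====
-- stated objective: alternative
-- what changed: Replaces A's forward accumulate-and-reset loop by a backward scan that starts at the last digit, repeatedly finds the previous digit to delimit each chunk, and builds the output back-to-front before one final reverse.
import Mathlib
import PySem

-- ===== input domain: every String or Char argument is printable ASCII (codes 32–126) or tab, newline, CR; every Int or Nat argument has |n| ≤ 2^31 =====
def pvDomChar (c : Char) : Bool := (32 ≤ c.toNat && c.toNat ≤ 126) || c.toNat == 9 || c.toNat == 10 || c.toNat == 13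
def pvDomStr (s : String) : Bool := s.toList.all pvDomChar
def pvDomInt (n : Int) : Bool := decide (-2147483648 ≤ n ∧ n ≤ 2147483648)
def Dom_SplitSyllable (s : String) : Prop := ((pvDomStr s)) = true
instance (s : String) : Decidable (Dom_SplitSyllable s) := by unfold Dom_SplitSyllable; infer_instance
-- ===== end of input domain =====

-- B replaces A's forward accumulate-and-reset loop by a backward scan from the
-- last digit that cuts each chunk at the previous digit, building the output
-- back-to-front and reversing once; same cost, different traversal order.

-- ===== PORT A =====
-- literal port of A: one loop over range(len(s)) carrying (l, begin)
def SplitSyllable (s : String) : List String :=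
  let cs := s.toList
  let r := (PySem.List.pyRange 0 (PySem.List.len cs) 1).foldl
    (fun (st : List String × Int) i =>
      if PySem.Chars.isdigit (PySem.List.pyGetD cs i ' ') then
        (st.1 ++ [String.ofList (PySem.List.slice cs (some st.2) (some (i + 1)))], i + 1)
      else st) ([], 0)
  r.1

-- ===== PORT B =====
-- port of Source B's inner backward while loops "while p >= 0 and not s[p].isdigit(): p -= 1",
-- encoding position p as the Nat p+1 (0 encodes p = -1); returns (final p)+1.
-- s[p] for 0 ≤ p < len(s) is exactly cs.getD p ' ' (index always in range here).
def pvAltScan (cs : List Char) : Nat → Nat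
  | 0 => 0
  | k + 1 => if PySem.Chars.isdigit (cs.getD k ' ') then k + 1 else pvAltScan cs k

-- termination bound for the outer loop (cited by pvAltLoop's decreasing_by)
lemma pvAltScan_le (cs : List Char) : ∀ k, pvAltScan cs k ≤ k := by
  intro k
  induction k with
  | zero => simp [pvAltScan]
  | succ k ih =>
    unfold pvAltScan
    split
    · exact le_refl _
    · exact Nat.le_succ_of_le ih

-- port of Source B's outer while loop (j encoded as k = j+1): append s[i+1:j+1]
-- (i+1 = pvAltScan cs j) then continue at j = i; chunks come out back-to-front.
def pvAltLoop (cs : List Char) : Nat → List String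
  | 0 => []
  | k + 1 =>
    String.ofList (PySem.List.slice cs (some ((pvAltScan cs k : Nat) : Int)) (some ((k : Int) + 1)))
      :: pvAltLoop cs (pvAltScan cs k)
  termination_by k => k
  decreasing_by exact Nat.lt_succ_of_le (pvAltScan_le cs k)

def SplitSyllable_alt (s : String) : List String :=
  (pvAltLoop s.toList (pvAltScan s.toList s.toList.length)).reverse

-- ===== PRECONDITION & SPEC =====
def Spec_SplitSyllable (s : String) (out : List String) : Prop := out = SplitSyllable_alt s
instance (s : String) (out : List String) : Decidable (Spec_SplitSyllable s out) := by unfold Spec_SplitSyllable; infer_instance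

-- ===== CLAIM (what is proved, stated in full; the proofs are below) =====
def Claim_equal_SplitSyllable : Prop := ∀ (s : String), Dom_SplitSyllable s → Spec_SplitSyllable s (SplitSyllable s)

-- ===== LEMMAS AND PROOFS =====

-- digit boundary positions (each is digit-index + 1) among the first n characters
def pvBoundsN (cs : List Char) (n : Nat) : List Nat :=
  (List.range n).filterMap
    (fun i => if PySem.Chars.isdigit (cs[i]?.getD ' ') then some (i + 1) else none)

def pvChunkN (cs : List Char) (a b : Nat) : String :=
  String.ofList ((cs.drop a).take (b - a))

def pvChunksN (cs : List Char) (bs : List Nat) : List String :=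
  (List.zip (0 :: bs) bs).map (fun ab => pvChunkN cs ab.1 ab.2)

lemma pvAltScan_succ (cs : List Char) (k : Nat) :
    pvAltScan cs (k + 1) =
      if PySem.Chars.isdigit (cs[k]?.getD ' ') then k + 1 else pvAltScan cs k := rfl

lemma pv_zip_shift {α : Type} (b : List α) (a x : α) :
    List.zip (a :: (b ++ [x])) (b ++ [x]) = List.zip (a :: b) b ++ [(b.getLastD a, x)] := by
  induction b generalizing a with
  | nil => rfl
  | cons c b' ih =>
    simp only [List.cons_append, List.zip_cons_cons, ih c, List.getLastD_cons]

lemma pvChunksN_append (cs : List Char) (b : List Nat) (x : Nat) :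
    pvChunksN cs (b ++ [x]) = pvChunksN cs b ++ [pvChunkN cs (b.getLastD 0) x] := by
  simp [pvChunksN, pv_zip_shift]

lemma pvBoundsN_succ (cs : List Char) (n : Nat) :
    pvBoundsN cs (n + 1) =
      pvBoundsN cs n ++
        (if PySem.Chars.isdigit (cs[n]?.getD ' ') then [n + 1] else []) := by
  unfold pvBoundsN
  rw [List.range_succ, List.filterMap_append]
  by_cases h : PySem.Chars.isdigit (cs[n]?.getD ' ')
  · simp [h]
  · simp [h]

-- A's loop computes (chunks of the boundary list, last boundary)
lemma pv_loop (cs : List Char) (n : Nat) :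
    ((List.range n).foldl
      (fun (st : List String × Int) (i : Nat) =>
        if PySem.Chars.isdigit (PySem.List.pyGetD cs (i : Int) ' ') then
          (st.1 ++ [String.ofList (PySem.List.slice cs (some st.2) (some ((i : Int) + 1)))], (i : Int) + 1)
        else st) ([], 0))
    = (pvChunksN cs (pvBoundsN cs n), (((pvBoundsN cs n).getLastD 0 : Nat) : Int)) := by
  induction n with
  | zero => simp [pvBoundsN, pvChunksN]
  | succ n ih =>
    rw [List.range_succ, List.foldl_append, ih, pvBoundsN_succ]
    simp only [List.foldl_cons, List.foldl_nil, PySem.List.pyGetD_natCast, List.getD]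
    by_cases h : PySem.Chars.isdigit (cs[n]?.getD ' ')
    · simp only [h, if_true, pvChunksN_append, List.getLastD_concat]
      have hc : ((n : Int) + 1) = (((n + 1 : Nat) : Nat) : Int) := by push_cast; ring
      rw [hc, PySem.List.slice_natCast]
      simp [pvChunkN]
    · simp only [h, if_false, List.append_nil, Bool.false_eq_true]

-- pvAltScan's result IS the last boundary (or 0)
lemma pvAltScan_eq_getLastD (cs : List Char) (n : Nat) :
    pvAltScan cs n = (pvBoundsN cs n).getLastD 0 := by
  induction n with
  | zero => simp [pvAltScan, pvBoundsN]
  | succ n ih =>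
    rw [pvBoundsN_succ, pvAltScan_succ]
    by_cases h : PySem.Chars.isdigit (cs[n]?.getD ' ')
    · simp only [h, if_true]
      exact List.getLastD_concat.symm
    · simp [h, ih]

-- B's backward loop builds exactly the reversed chunk list
lemma pvAltLoop_eq (cs : List Char) (n : Nat) :
    pvAltLoop cs (pvAltScan cs n) = (pvChunksN cs (pvBoundsN cs n)).reverse := by
  induction n with
  | zero => simp [pvAltScan, pvBoundsN, pvChunksN, pvAltLoop]
  | succ n ih =>
    rw [pvBoundsN_succ]
    by_cases h : PySem.Chars.isdigit (cs[n]?.getD ' ')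
    · have hs : pvAltScan cs (n + 1) = n + 1 := by
        rw [pvAltScan_succ]; exact if_pos h
      rw [hs, pvAltLoop, if_pos h, pvChunksN_append, List.reverse_append]
      have hc : ((n : Int) + 1) = (((n + 1 : Nat) : Nat) : Int) := by push_cast; ring
      rw [hc, PySem.List.slice_natCast, ih, pvAltScan_eq_getLastD]
      simp [pvChunkN]
    · have hs : pvAltScan cs (n + 1) = pvAltScan cs n := by
        rw [pvAltScan_succ]; exact if_neg h
      simp [hs, h, ih]

-- ===== VERDICT (by name: the statement is the Claim_ definition above) =====
theorem SplitSyllable_spec : Claim_equal_SplitSyllable := by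
  intro s _
  unfold Spec_SplitSyllable SplitSyllable SplitSyllable_alt
  simp only []
  rw [PySem.List.len_eq, PySem.List.pyRange_zero_natCast, List.foldl_map, pv_loop,
    pvAltLoop_eq, List.reverse_reverse]
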